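-- pv_equiv track=rewrite | github.com/LystrxNya/astrbot_plugin_Omni_Tutor | core/doc_processor.py | _merge_math_blocks
-- ===== SOURCE A (Python) =====
-- def _merge_math_blocks(blocks: list[str]) -> list[str]:
--     """
--     核心力场：确保 $$ $$ 公式块绝对不会被 \n\n 切断
--     """
--     safe_blocks = []
--     buffer = []
--     in_math = False
--
--     for block in blocks:
--         buffer.append(block)
--
--         # 统计当前段落里 $$ 出现的次数
--         math_count = block.count('$$')
--
--         # 如果出现奇数次，说明我们正在跨越公式的边界（进入或离开）
--         if math_count % 2 != 0:
--             in_math = not in_math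
--
--         # 如果当前不在公式块内部，说明 buffer 积攒的内容是一个安全的完整逻辑块
--         if not in_math:
--             safe_blocks.append("\n\n".join(buffer))
--             buffer = []
--
--     # 兜底防爆：如果解析到最后，发现 in_math 还是 True
--     # (通常是因为 OCR 偶尔抽风漏识别了结尾的 $$)，强行闭合保存，防止数据丢失
--     if buffer:
--         safe_blocks.append("\n\n".join(buffer))
--
--     return safe_blocks
-- ===== SOURCE B (Python) =====
-- def _merge_math_blocks(blocks: list[str]) -> list[str]:
--     if not blocks:
--         return []
--     # Pass 1: boundary indices where the cumulative '$$' count is even.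
--     bounds = []
--     parity = 0
--     for i, block in enumerate(blocks):
--         parity = (parity + block.count('$$')) % 2
--         if parity == 0:
--             bounds.append(i + 1)
--     if not bounds or bounds[-1] != len(blocks):
--         bounds.append(len(blocks))  # flush an unclosed trailing math block
--     # Pass 2: slice the blocks into the groups those boundaries delimit.
--     out = []
--     start = 0
--     for end in bounds:
--         out.append("\n\n".join(blocks[start:end]))
--         start = end
--     return out
-- ===== Notes on version B (the rewrite author's own statement) =====
-- stated objective: alternative
-- what changed: Replaces A's single accumulate-and-flush loop (buffer list + in_math toggle) by two passes: first collect the boundary indices where the cumulative '$$' count is even (appending the end if an unclosed math block remains), then slice the input at those boundaries and join each slice.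
import Mathlib
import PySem

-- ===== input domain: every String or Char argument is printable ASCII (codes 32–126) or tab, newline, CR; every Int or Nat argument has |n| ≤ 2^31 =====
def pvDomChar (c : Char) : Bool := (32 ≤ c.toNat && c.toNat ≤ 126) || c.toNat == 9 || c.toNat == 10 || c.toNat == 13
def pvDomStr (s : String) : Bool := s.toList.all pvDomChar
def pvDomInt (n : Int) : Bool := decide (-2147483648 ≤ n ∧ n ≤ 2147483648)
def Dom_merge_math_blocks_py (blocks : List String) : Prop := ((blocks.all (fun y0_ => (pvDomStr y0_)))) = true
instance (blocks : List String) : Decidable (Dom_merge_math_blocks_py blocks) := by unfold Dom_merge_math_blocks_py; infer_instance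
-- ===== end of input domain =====

-- B replaces A's single toggling accumulate-and-flush loop by two passes: collect the
-- boundary indices where the cumulative '$$' count is even, then slice the input at those
-- boundaries and join each group (objective: alternative decomposition, same cost).

-- ===== PORT A =====
def merge_math_blocks_py (blocks : List String) : List String :=
  let st := blocks.foldl
    (fun (st : List String × List String × Bool) block =>
      let buffer := st.2.1 ++ [block]
      let math_count := PySem.Str.count block "$$"
      let in_math := if math_count % 2 ≠ 0 then !st.2.2 else st.2.2
      if !in_math then (st.1 ++ [PySem.Str.join "\n\n" buffer], [], in_math)
      else (st.1, buffer, in_math))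
    ([], [], false)
  if st.2.1 ≠ [] then st.1 ++ [PySem.Str.join "\n\n" st.2.1] else st.1

-- ===== PORT B =====
def merge_math_blocks_py_alt (blocks : List String) : List String :=
  if blocks = [] then []
  else
    -- pass 1: boundary indices with even cumulative '$$' count
    let st := (PySem.List.enumerate blocks 0).foldl
      (fun (st : List Int × Nat) ib =>
        let parity := (st.2 + PySem.Str.count ib.2 "$$") % 2
        if parity = 0 then (st.1 ++ [ib.1 + 1], parity) else (st.1, parity))
      ([], 0)
    let bounds := if st.1 = [] ∨ st.1.getLast? ≠ some (blocks.length : Int)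
      then st.1 ++ [(blocks.length : Int)] else st.1
    -- pass 2: slice at the boundaries and join each group
    (bounds.foldl
      (fun (acc : List String × Int) e =>
        (acc.1 ++ [PySem.Str.join "\n\n" (PySem.List.slice blocks (some acc.2) (some e))], e))
      ([], 0)).1

-- ===== PRECONDITION & SPEC =====
def Spec_merge_math_blocks_py (blocks : List String) (out : List String) : Prop := out = merge_math_blocks_py_alt blocks
instance (blocks : List String) (out : List String) : Decidable (Spec_merge_math_blocks_py blocks out) := by unfold Spec_merge_math_blocks_py; infer_instance

-- ===== CLAIM (what is proved, stated in full; the proofs are below) =====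
def Claim_equal_merge_math_blocks_py : Prop := ∀ (blocks : List String), Dom_merge_math_blocks_py blocks → Spec_merge_math_blocks_py blocks (merge_math_blocks_py blocks)

-- ===== LEMMAS AND PROOFS =====

def pvGroups : List String → List String → Bool → List String
  | [], buf, _ => if buf = [] then [] else [PySem.Str.join "\n\n" buf]
  | b :: rest, buf, m =>
      let m' := if PySem.Str.count b "$$" % 2 ≠ 0 then !m else m
      if !m' then PySem.Str.join "\n\n" (buf ++ [b]) :: pvGroups rest [] false
      else pvGroups rest (buf ++ [b]) m'

def pvBnds : List String → Int → Nat → List Int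
  | [], _, _ => []
  | b :: rs, s, p =>
      let q := (p + PySem.Str.count b "$$") % 2
      if q = 0 then (s + 1) :: pvBnds rs (s + 1) q else pvBnds rs (s + 1) q

def pvParity : List String → Nat → Nat
  | [], p => p
  | b :: rs, p => pvParity rs ((p + PySem.Str.count b "$$") % 2)

def pvCuts (L : List String) : List Int → Int → List String
  | [], _ => []
  | e :: es, s => PySem.Str.join "\n\n" (PySem.List.slice L (some s) (some e)) :: pvCuts L es e

lemma pvToggle (p c : Nat) (hp : p < 2) :
    (if c % 2 ≠ 0 then !(p == 1) else (p == 1)) = ((p + c) % 2 == 1) := by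
  rcases Nat.mod_two_eq_zero_or_one c with hc | hc <;> interval_cases p <;>
    simp [Nat.add_mod, hc]

lemma pvSlice_mid (pre l2 : List String) (k : Nat) (hk : k ≤ pre.length) :
    PySem.List.slice (pre ++ l2) (some (k : Int)) (some ((pre.length : Int) + 1))
    = pre.drop k ++ l2.take 1 := by
  have h1 : ((pre.length : Int) + 1) = (((pre.length + 1 : Nat)) : Int) := by push_cast; ring
  rw [h1, PySem.List.slice_natCast, List.drop_append_of_le_length hk,
    List.take_append]
  have h2 : (pre.drop k).length ≤ pre.length + 1 - k := by simp; omega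
  have h3 : pre.length + 1 - k - (pre.drop k).length = 1 := by simp; omega
  rw [List.take_of_length_le h2, h3]

lemma pvSlice_all (L : List String) (k : Nat) :
    PySem.List.slice L (some (k : Int)) (some (L.length : Int)) = L.drop k := by
  rw [PySem.List.slice_natCast, List.take_of_length_le (by simp)]

lemma pvLast_bnds (rest : List String) : ∀ (s : Int) (p : Nat), rest ≠ [] →
    ((pvBnds rest s p).getLast? = some (s + rest.length) ↔ pvParity rest p = 0) := by
  induction rest with
  | nil => simp
  | cons b rs ih =>
      intro s p _
      have hL : (s + (((b :: rs).length : Nat) : Int)) = (s + 1) + (rs.length : Int) := by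
        simp only [List.length_cons]; push_cast; ring
      rw [hL]
      simp only [pvBnds, pvParity]
      by_cases hrs : rs = []
      · subst hrs
        by_cases hq : (p + PySem.Str.count b "$$") % 2 = 0
        · rw [if_pos hq]
          simp only [pvBnds, pvParity, List.getLast?_singleton, List.length_nil]
          simp
          simpa using hq
        · rw [if_neg hq]
          simp only [pvBnds, pvParity, List.getLast?_nil, List.length_nil]
          simp at hq ⊢
          omega
      · have ihx := ih (s + 1) ((p + PySem.Str.count b "$$") % 2) hrs
        by_cases hq : (p + PySem.Str.count b "$$") % 2 = 0
        · rw [if_pos hq]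
          rcases hB : pvBnds rs (s + 1) ((p + PySem.Str.count b "$$") % 2) with _ | ⟨x, xs⟩
          · rw [hB] at ihx
            simp only [List.getLast?_nil] at ihx
            have hpar : pvParity rs ((p + PySem.Str.count b "$$") % 2) ≠ 0 := by
              intro h0
              have := ihx.mpr h0
              simp at this
            simp only [List.getLast?_singleton]
            constructor
            · intro h
              exfalso
              have h2 : (s : Int) + 1 = s + 1 + (rs.length : Int) := Option.some.inj h
              have hlen : rs.length = 0 := by omega
              exact hrs (List.eq_nil_of_length_eq_zero hlen)
            · intro h0
              exact absurd h0 hpar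
          · rw [hB] at ihx
            rw [List.getLast?_cons_cons]
            rw [← hB] at ihx ⊢
            exact ihx
        · rw [if_neg hq]
          exact ihx

lemma pvMain (rest : List String) : ∀ (pre : List String) (k p : Nat),
    k ≤ pre.length → p < 2 → (p = 0 → k = pre.length) → (p = 1 → k < pre.length) →
    pvCuts (pre ++ rest)
      (pvBnds rest (pre.length : Int) p ++
        (if pvParity rest p = 0 then [] else [(((pre ++ rest).length : Nat) : Int)]))
      (k : Int)
    = pvGroups rest (pre.drop k) (p == 1) := by
  induction rest with
  | nil =>
      intro pre k p hk hp h0 h1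
      simp only [pvBnds, pvParity, pvGroups, List.nil_append, List.append_nil]
      interval_cases p
      · have hk' : k = pre.length := h0 rfl
        subst hk'
        simp [pvCuts, List.drop_length]
      · have hk' : k < pre.length := h1 rfl
        rw [if_neg (by omega : ¬ (1:Nat) = 0)]
        simp only [pvCuts]
        rw [pvSlice_all pre k]
        have hne : pre.drop k ≠ [] := by
          intro h
          have := congrArg List.length h
          simp at this
          omega
        simp [hne]
  | cons b rs ih =>
      intro pre k p hk hp h0 h1
      have hq2 : (p + PySem.Str.count b "$$") % 2 < 2 := Nat.mod_lt _ (by omega)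
      simp only [pvBnds, pvParity, pvGroups]
      rw [pvToggle p _ hp]
      by_cases hq : (p + PySem.Str.count b "$$") % 2 = 0
      · simp only [hq, if_true]
        simp only [List.cons_append, pvCuts]
        rw [pvSlice_mid pre (b :: rs) k hk]
        have hih := ih (pre ++ [b]) (pre ++ [b]).length 0 le_rfl (by omega)
          (fun _ => rfl) (by omega)
        have e1 : (((pre ++ [b]).length : Nat) : Int) = (pre.length : Int) + 1 := by
          simp
        have e2 : (pre ++ [b]) ++ rs = pre ++ b :: rs := by simp
        rw [e1, e2, List.drop_length] at hih
        rw [hih]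
        simp
      · have hq1 : (p + PySem.Str.count b "$$") % 2 = 1 := by omega
        simp only [hq1]
        rw [if_neg (by omega : ¬ (1:Nat) = 0)]
        have hih := ih (pre ++ [b]) k 1 (by simp; omega) (by omega)
          (fun h => absurd h (by omega)) (fun _ => by simp; omega)
        have e1 : (((pre ++ [b]).length : Nat) : Int) = (pre.length : Int) + 1 := by
          simp
        have e2 : (pre ++ [b]) ++ rs = pre ++ b :: rs := by simp
        rw [e1, e2, List.drop_append_of_le_length hk] at hih
        rw [hih]
        simp

lemma pvA_fold (rest : List String) : ∀ (safe buf : List String) (m : Bool),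
    (let st := rest.foldl
      (fun (st : List String × List String × Bool) block =>
        let buffer := st.2.1 ++ [block]
        let math_count := PySem.Str.count block "$$"
        let in_math := if math_count % 2 ≠ 0 then !st.2.2 else st.2.2
        if !in_math then (st.1 ++ [PySem.Str.join "\n\n" buffer], [], in_math)
        else (st.1, buffer, in_math))
      (safe, buf, m)
     if st.2.1 ≠ [] then st.1 ++ [PySem.Str.join "\n\n" st.2.1] else st.1)
    = safe ++ pvGroups rest buf m := by
  intro safe buf m
  induction rest generalizing safe buf m with
  | nil =>
      by_cases h : buf = [] <;> simp [pvGroups, h]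
  | cons b rs ih =>
      simp only [List.foldl_cons, pvGroups]
      cases hm : (if PySem.Str.count b "$$" % 2 ≠ 0 then !m else m) with
      | false =>
          simpa using ih (safe ++ [PySem.Str.join "\n\n" (buf ++ [b])]) [] false
      | true =>
          simpa using ih safe (buf ++ [b]) true

lemma pvB_fold1 (rest : List String) : ∀ (s : Int) (acc : List Int) (p : Nat),
    (PySem.List.enumerate rest s).foldl
      (fun (st : List Int × Nat) ib =>
        let parity := (st.2 + PySem.Str.count ib.2 "$$") % 2
        if parity = 0 then (st.1 ++ [ib.1 + 1], parity) else (st.1, parity))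
      (acc, p)
    = (acc ++ pvBnds rest s p, pvParity rest p) := by
  intro s acc p
  induction rest generalizing s acc p with
  | nil => simp [PySem.List.enumerate_nil, pvBnds, pvParity]
  | cons b rs ih =>
      rw [PySem.List.enumerate_cons]
      simp only [List.foldl_cons]
      simp only [pvBnds, pvParity]
      by_cases h : (p + PySem.Str.count b "$$") % 2 = 0
      · rw [if_pos h, if_pos h, h, ih]
        simp
      · rw [if_neg h, if_neg h, ih]

lemma pvB_fold2 (L : List String) (bounds : List Int) : ∀ (out : List String) (s : Int),
    (bounds.foldl
      (fun (acc : List String × Int) e =>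
        (acc.1 ++ [PySem.Str.join "\n\n" (PySem.List.slice L (some acc.2) (some e))], e))
      (out, s)).1
    = out ++ pvCuts L bounds s := by
  intro out s
  induction bounds generalizing out s with
  | nil => simp [pvCuts]
  | cons e es ih =>
      simp only [List.foldl_cons, pvCuts]
      simpa using
        ih (out ++ [PySem.Str.join "\n\n" (PySem.List.slice L (some s) (some e))]) e

-- ===== VERDICT (by name: the statement is the Claim_ definition above) =====
theorem merge_math_blocks_py_spec : Claim_equal_merge_math_blocks_py := by
  intro blocks _
  unfold Spec_merge_math_blocks_py
  by_cases hb : blocks = []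
  · subst hb; rfl
  · have hA : merge_math_blocks_py blocks = pvGroups blocks [] false :=
      pvA_fold blocks [] [] false
    rw [hA]
    unfold merge_math_blocks_py_alt
    rw [if_neg hb]
    simp only [pvB_fold1 blocks 0 [] 0, List.nil_append, pvB_fold2]
    have hlast := pvLast_bnds blocks 0 0 hb
    rw [zero_add] at hlast
    by_cases hpar : pvParity blocks 0 = 0
    · have hl : (pvBnds blocks 0 0).getLast? = some (blocks.length : Int) := hlast.mpr hpar
      have hcond : ¬ (pvBnds blocks 0 0 = [] ∨
          (pvBnds blocks 0 0).getLast? ≠ some (blocks.length : Int)) := by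
        push Not
        constructor
        · intro h0
          rw [h0] at hl
          simp at hl
        · simpa using hl
      rw [if_neg hcond]
      have hmain := pvMain blocks [] 0 0 (by simp) (by omega) (fun _ => rfl) (by omega)
      simp only [List.nil_append, List.length_nil, Nat.cast_zero, if_pos hpar,
        List.append_nil, List.drop_nil] at hmain
      simpa using hmain.symm
    · have hcond : (pvBnds blocks 0 0 = [] ∨
          (pvBnds blocks 0 0).getLast? ≠ some (blocks.length : Int)) := by
        right
        intro h
        exact hpar (hlast.mp h)
      rw [if_pos hcond]
      have hmain := pvMain blocks [] 0 0 (by simp) (by omega) (fun _ => rfl) (by omega)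
      simp only [List.nil_append, List.length_nil, Nat.cast_zero, if_neg hpar,
        List.drop_nil] at hmain
      simpa using hmain.symm
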